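-- pv_equiv track=rewrite | github.com/millerbrook/PRINT_sequence_model | parse_initial_data.py | extract_fields_from_record
-- ===== SOURCE A (Python) =====
-- def extract_fields_from_record(record_text):
--     """Extract structured fields from a single record"""
--     # Define all possible field headers
--     headers = [
--         "Citation", "Proposed Title", "Date", "Sender", "Sender Place",
--         "Receiver", "Receiver Place", "Transcription"
--     ]
--
--     # Initialize an empty dictionary for the record
--     record_data = {header.lower().replace(" ", "_"): "" for header in headers}
--
--     # Current field being processed
--     current_field = None
--     current_content = []
--
--     # Process each line
--     for line in record_text.split('\n'):
--         matched = False
--         for header in headers: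
--             if line.startswith(f"{header}:"):
--                 # Save the previous field if there was one
--                 if current_field:
--                     record_data[current_field] = '\n'.join(current_content).strip()
--
--                 # Start a new field
--                 current_field = header.lower().replace(" ", "_")
--                 current_content = [line[len(header)+1:].strip()]
--                 matched = True
--                 break
--
--         if not matched and current_field:
--             # Continue with the current field
--             current_content.append(line)
--
--     # Don't forget to save the last field being processed
--     if current_field:
--         record_data[current_field] = '\n'.join(current_content).strip()
--
--     return record_data
-- ===== SOURCE B (Python) =====
-- def extract_fields_from_record(record_text):
--     """Extract structured fields from a single record (two-phase: index headers, then slice)."""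
--     headers = [
--         "Citation", "Proposed Title", "Date", "Sender", "Sender Place",
--         "Receiver", "Receiver Place", "Transcription"
--     ]
--     result = {h.lower().replace(" ", "_"): "" for h in headers}
--     lines = record_text.split('\n')
--     # Phase 1: locate every header line: (line index, field key, offset past the colon)
--     marks = []
--     for i, line in enumerate(lines):
--         for h in headers:
--             if line.startswith(h + ":"):
--                 marks.append((i, h.lower().replace(" ", "_"), len(h) + 1))
--                 break
--     # Phase 2: slice out each segment between consecutive header lines
--     ends = [i for (i, _, _) in marks[1:]] + [len(lines)]
--     for (i, key, off), end in zip(marks, ends):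
--         body = [lines[i][off:].strip()] + lines[i + 1:end]
--         result[key] = '\n'.join(body).strip()
--     return result
-- ===== Notes on version B (the rewrite author's own statement) =====
-- stated objective: alternative
-- what changed: Replaces A's streaming current_field/current_content accumulator with a two-phase shape: first index all header lines as (index, key, offset) boundaries, then slice the line list between consecutive boundaries and assign each joined segment into the pre-initialized dict.
import Mathlib
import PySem

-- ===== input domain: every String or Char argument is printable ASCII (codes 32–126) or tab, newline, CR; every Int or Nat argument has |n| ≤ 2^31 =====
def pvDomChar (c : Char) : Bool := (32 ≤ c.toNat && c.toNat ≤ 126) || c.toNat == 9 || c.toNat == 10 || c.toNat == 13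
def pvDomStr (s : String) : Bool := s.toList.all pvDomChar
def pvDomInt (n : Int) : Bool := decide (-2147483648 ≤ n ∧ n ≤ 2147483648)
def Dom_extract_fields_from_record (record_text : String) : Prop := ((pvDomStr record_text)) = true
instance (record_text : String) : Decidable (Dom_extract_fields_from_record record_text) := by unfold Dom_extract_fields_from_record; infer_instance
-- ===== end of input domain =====

-- B replaces A's streaming current_field/current_content accumulator by a two-phase shape (index all header lines, then slice the segments); same result, proved equal.


-- ===== PORT A =====
-- shared module constants: the header list and the header → dict-key transformation
def pvHeaders : List String :=
  ["Citation", "Proposed Title", "Date", "Sender", "Sender Place",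
   "Receiver", "Receiver Place", "Transcription"]

def pvKey (h : String) : String := PySem.Str.replace (PySem.Str.lower h) " " "_"

-- the inner 'for header in headers: if line.startswith(header + ":"): … break' loop (first match wins)
def pvMatch (line : String) : Option String :=
  pvHeaders.find? (fun h => PySem.Str.startswith line (h ++ ":"))

-- the initial dict {key(h): "" for h in headers} (identical comprehension in both Pythons)
def pvInit : PySem.Dict String String :=
  pvHeaders.foldl (fun d h => d.insert (pvKey h) "") PySem.Dict.empty

-- one iteration of A's 'for line in record_text.split('\n')' loop; state = (record_data, current_field, current_content)
def pvStepA (s : PySem.Dict String String × Option String × List String) (line : String) :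
    PySem.Dict String String × Option String × List String :=
  match pvMatch line with
  | some h =>
      let d' := match s.2.1 with
        | some k => s.1.insert k (PySem.Str.strip (PySem.Str.join "\n" s.2.2))
        | none => s.1
      (d', some (pvKey h),
        [PySem.Str.strip (PySem.Str.slice line (some (PySem.Str.len h + 1)) none)])
  | none =>
      match s.2.1 with
      | some _ => (s.1, s.2.1, s.2.2 ++ [line])
      | none => s

-- the final 'if current_field: record_data[current_field] = …'
def pvFinA (s : PySem.Dict String String × Option String × List String) :
    PySem.Dict String String :=
  match s.2.1 with
  | some k => s.1.insert k (PySem.Str.strip (PySem.Str.join "\n" s.2.2))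
  | none => s.1

def extract_fields_from_record (record_text : String) : List (String × String) :=
  let lines := (PySem.Str.split? record_text "\n").getD []   -- sep "\n" ≠ "": split? is always `some` here
  (pvFinA (lines.foldl pvStepA (pvInit, none, []))).items

-- ===== PORT B =====
-- Phase-1 loop body of B: 'if line starts a header: marks.append((i, key, offset))'
def pvMarkStep (acc : List (Int × String × Int)) (p : Int × String) : List (Int × String × Int) :=
  match pvMatch p.2 with
  | some h => acc ++ [(p.1, pvKey h, PySem.Str.len h + 1)]
  | none => acc

def extract_fields_from_record_alt (record_text : String) : List (String × String) :=
  let lines := (PySem.Str.split? record_text "\n").getD []   -- sep "\n" ≠ "": split? is always `some` here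
  -- Phase 1: marks = [(i, key, offset) for each header line]
  let marks := (PySem.List.enumerate lines).foldl pvMarkStep []
  -- Phase 2: ends = [i for (i, _, _) in marks[1:]] + [len(lines)]; assign each sliced segment
  let ends := (PySem.List.slice marks (some 1) none).map (fun m => m.1) ++ [PySem.List.len lines]
  let d := (marks.zip ends).foldl
      (fun (d : PySem.Dict String String) q =>
        d.insert q.1.2.1 (PySem.Str.strip (PySem.Str.join "\n"
          ([PySem.Str.strip (PySem.Str.slice (PySem.List.pyGetD lines q.1.1 "") (some q.1.2.2) none)]
            ++ PySem.List.slice lines (some (q.1.1 + 1)) (some q.2))))) pvInit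
  d.items

-- ===== PRECONDITION & SPEC =====
def Spec_extract_fields_from_record (record_text : String) (out : List (String × String)) : Prop := out = extract_fields_from_record_alt record_text
instance (record_text : String) (out : List (String × String)) : Decidable (Spec_extract_fields_from_record record_text out) := by unfold Spec_extract_fields_from_record; infer_instance

-- ===== CLAIM (what is proved, stated in full; the proofs are below) =====
def Claim_equal_extract_fields_from_record : Prop := ∀ (record_text : String), Dom_extract_fields_from_record record_text → Spec_extract_fields_from_record record_text (extract_fields_from_record record_text)

-- ===== LEMMAS AND PROOFS =====

-- proof-only helpers: the common segment decomposition both ports compute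
def pvNoH (line : String) : Bool := (pvMatch line).isNone

def pvSegs : List String → List (String × String)
  | [] => []
  | l :: ls =>
    match pvMatch l with
    | none => pvSegs ls
    | some h =>
        (pvKey h, PySem.Str.strip (PySem.Str.join "\n"
           ([PySem.Str.strip (PySem.Str.slice l (some (PySem.Str.len h + 1)) none)]
             ++ ls.takeWhile pvNoH)))
        :: pvSegs (ls.dropWhile pvNoH)
termination_by l => l.length
decreasing_by
  all_goals
    simp only [List.length_cons]
    have := List.length_dropWhile_le pvNoH ls
    omega

def pvAssign (d : PySem.Dict String String) (ps : List (String × String)) :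
    PySem.Dict String String :=
  ps.foldl (fun d p => d.insert p.1 p.2) d

def pvMarksRec : Int → List String → List (Int × String × Int)
  | _, [] => []
  | n, l :: ls =>
    match pvMatch l with
    | some h => (n, pvKey h, PySem.Str.len h + 1) :: pvMarksRec (n + 1) ls
    | none => pvMarksRec (n + 1) ls

def pvPairs (lines : List String) (ms : List (Int × String × Int)) : List (String × String) :=
  (ms.zip ((PySem.List.slice ms (some 1) none).map (fun m => m.1) ++ [PySem.List.len lines])).map
    (fun q => (q.1.2.1, PySem.Str.strip (PySem.Str.join "\n"
        ([PySem.Str.strip (PySem.Str.slice (PySem.List.pyGetD lines q.1.1 "") (some q.1.2.2) none)]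
          ++ PySem.List.slice lines (some (q.1.1 + 1)) (some q.2)))))

theorem pv_marks_foldl (ls : List String) (s : Int) (acc : List (Int × String × Int)) :
    (PySem.List.enumerate ls s).foldl pvMarkStep acc = acc ++ pvMarksRec s ls := by
  induction ls generalizing s acc with
  | nil => simp [PySem.List.enumerate_nil, pvMarksRec]
  | cons l ls ih =>
      rw [PySem.List.enumerate_cons]
      simp only [List.foldl_cons]
      cases hm : pvMatch l with
      | some h =>
          rw [show pvMarkStep acc (s, l) = acc ++ [(s, pvKey h, PySem.Str.len h + 1)] from by
            unfold pvMarkStep; rw [hm]]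
          rw [ih, pvMarksRec, hm]
          simp
      | none =>
          rw [show pvMarkStep acc (s, l) = acc from by unfold pvMarkStep; rw [hm]]
          rw [ih, pvMarksRec, hm]

theorem pv_marks_skip (t : List String) (r : List String) (n : Int)
    (h : ∀ l ∈ t, pvMatch l = none) :
    pvMarksRec n (t ++ r) = pvMarksRec (n + t.length) r := by
  induction t generalizing n with
  | nil => simp
  | cons l t ih =>
      have hl : pvMatch l = none := h l (by simp)
      simp only [List.cons_append, pvMarksRec, hl]
      rw [ih _ (fun x hx => h x (by simp [hx]))]
      congr 1
      simp only [List.length_cons]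
      push_cast
      ring

theorem pv_getD_mid (pre : List String) (l : String) (ls : List String) :
    PySem.List.pyGetD (pre ++ l :: ls) ((pre.length : Int)) "" = l := by
  rw [PySem.List.pyGetD_natCast]
  simp [List.getD_eq_getElem?_getD]

theorem pv_slice_mid (pre : List String) (l : String) (t r : List String) :
    PySem.List.slice (pre ++ l :: (t ++ r)) (some ((pre.length : Int) + 1))
      (some ((pre.length : Int) + 1 + (t.length : Int))) = t := by
  rw [show ((pre.length : Int) + 1) = (((pre.length + 1 : Nat)) : Int) by push_cast; ring]
  rw [PySem.List.slice_natCast_add]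
  rw [show pre ++ l :: (t ++ r) = (pre ++ [l]) ++ (t ++ r) by simp]
  rw [show pre.length + 1 = (pre ++ [l]).length by simp]
  rw [List.drop_left, List.take_left]

theorem pv_slice_end (pre : List String) (l : String) (ls : List String) :
    PySem.List.slice (pre ++ l :: ls) (some ((pre.length : Int) + 1))
      (some (PySem.List.len (pre ++ l :: ls))) = ls := by
  rw [PySem.List.len_eq]
  rw [show ((pre.length : Int) + 1) = (((pre.length + 1 : Nat)) : Int) by push_cast; ring]
  rw [PySem.List.slice_natCast]
  rw [show pre ++ l :: ls = (pre ++ [l]) ++ ls by simp]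
  rw [show pre.length + 1 = (pre ++ [l]).length by simp]
  rw [List.drop_left]
  apply List.take_of_length_le
  simp
  omega

set_option maxHeartbeats 1600000 in
theorem pv_pairs_segs (N : Nat) :
    ∀ suf : List String, suf.length ≤ N → ∀ pre : List String,
      pvPairs (pre ++ suf) (pvMarksRec (pre.length : Int) suf) = pvSegs suf := by
  induction N with
  | zero =>
      intro suf hlen pre
      have hs : suf = [] := List.length_eq_zero_iff.mp (Nat.le_zero.mp hlen)
      subst hs
      simp [pvMarksRec, pvPairs, pvSegs]
  | succ N ih =>
      intro suf hlen pre
      match suf with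
      | [] => simp [pvMarksRec, pvPairs, pvSegs]
      | l :: ls =>
        have hlen' : ls.length ≤ N := by simpa using hlen
        cases hm : pvMatch l with
        | none =>
            have := ih ls hlen' (pre ++ [l])
            simp only [pvMarksRec, hm]
            rw [pvSegs]
            simp only [hm]
            have hlen2 : (((pre ++ [l]).length : Nat) : Int) = (pre.length : Int) + 1 := by
              simp
            rw [show ((pre.length : Int) + 1) = (((pre ++ [l]).length : Nat) : Int) from hlen2.symm]
            simpa [List.append_assoc] using this
        | some h =>
            have hls : ls.takeWhile pvNoH ++ ls.dropWhile pvNoH = ls :=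
              List.takeWhile_append_dropWhile
            have htnone : ∀ x ∈ ls.takeWhile pvNoH, pvMatch x = none := by
              intro x hx
              have := List.mem_takeWhile_imp hx
              simpa [pvNoH, Option.isNone_iff_eq_none] using this
            rw [pvSegs]
            simp only [hm, pvMarksRec]
            have hskip : pvMarksRec ((pre.length : Int) + 1) ls =
                pvMarksRec ((pre.length : Int) + 1 + (ls.takeWhile pvNoH).length)
                  (ls.dropWhile pvNoH) := by
              conv_lhs => rw [← hls]
              exact pv_marks_skip _ _ _ htnone
            rw [hskip]
            cases hrr : ls.dropWhile pvNoH with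
            | nil =>
                have ht : ls.takeWhile pvNoH = ls := by
                  conv_rhs => rw [← hls]
                  rw [hrr]; simp
                simp only [pvMarksRec]
                rw [pvPairs, pvSegs]
                simp only [PySem.List.slice_from_one]
                simp only [List.tail_cons, List.map_nil, List.nil_append,
                  List.zip_cons_cons, List.zip_nil_right, List.map_cons, List.map_nil]
                rw [ht, pv_getD_mid, pv_slice_end]
            | cons r0 r' =>
                have hnoh0 : pvNoH r0 = false := by
                  have hne : ls.dropWhile pvNoH ≠ [] := by rw [hrr]; simp
                  have hh := List.head_dropWhile_not pvNoH hne
                  revert hh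
                  rw [show (ls.dropWhile pvNoH).head hne = r0 from by
                    have := hrr; revert hne; rw [this]; intro _; rfl]
                  intro hh
                  simpa using hh
                obtain ⟨h0, hm0⟩ : ∃ h0, pvMatch r0 = some h0 := by
                  cases e : pvMatch r0 with
                  | none => rw [pvNoH, e] at hnoh0; simp at hnoh0
                  | some h0 => exact ⟨h0, rfl⟩
                have hlen2 : (r0 :: r').length ≤ N := by
                  have hd := List.length_dropWhile_le pvNoH ls
                  rw [hrr] at hd
                  omega
                have hcast : (((pre ++ l :: ls.takeWhile pvNoH).length : Nat) : Int)
                    = (pre.length : Int) + 1 + ((ls.takeWhile pvNoH).length : Int) := by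
                  simp; ring
                have hih := ih (r0 :: r') hlen2 (pre ++ l :: ls.takeWhile pvNoH)
                rw [show (pre ++ l :: ls.takeWhile pvNoH) ++ (r0 :: r') = pre ++ l :: ls from by
                  conv_rhs => rw [← hls, hrr]
                  simp] at hih
                rw [hcast] at hih
                simp only [pvMarksRec, hm0] at hih ⊢
                rw [pvPairs]
                simp only [PySem.List.slice_from_one, List.tail_cons, List.map_cons,
                  List.cons_append, List.zip_cons_cons, List.map_cons]
                rw [show pre ++ l :: ls = pre ++ l :: (ls.takeWhile pvNoH ++ (r0 :: r')) from by
                  conv_lhs => rw [← hls, hrr]]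
                rw [pv_getD_mid, pv_slice_mid]
                rw [← hih, pvPairs]
                simp only [PySem.List.slice_from_one, List.tail_cons]
                rw [show pre ++ l :: ls = pre ++ l :: (ls.takeWhile pvNoH ++ (r0 :: r')) from by
                  conv_lhs => rw [← hls, hrr]]
                simp only [List.singleton_append, List.nil_append]

theorem pv_runA_pending (ls : List String)
    (d : PySem.Dict String String) (k : String) (cc : List String) :
    pvFinA (ls.foldl pvStepA (d, some k, cc)) =
      pvAssign d ((k, PySem.Str.strip (PySem.Str.join "\n" (cc ++ ls.takeWhile pvNoH)))
        :: pvSegs (ls.dropWhile pvNoH)) := by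
  induction ls generalizing d k cc with
  | nil => simp [pvFinA, pvAssign, pvSegs]
  | cons l ls ih =>
      cases hm : pvMatch l with
      | some h =>
          have hno : pvNoH l = false := by simp [pvNoH, hm]
          simp only [List.foldl_cons, pvStepA, hm]
          rw [ih]
          rw [List.takeWhile_cons_of_neg (by simp [hno]), List.dropWhile_cons_of_neg (by simp [hno])]
          rw [pvSegs]
          simp only [hm]
          simp [pvAssign]
      | none =>
          have hno : pvNoH l = true := by simp [pvNoH, hm]
          simp only [List.foldl_cons, pvStepA, hm]
          rw [ih]
          rw [List.takeWhile_cons_of_pos (by simp [hno]), List.dropWhile_cons_of_pos (by simp [hno])]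
          simp [List.append_assoc]

theorem pv_runA (ls : List String) (d : PySem.Dict String String) :
    pvFinA (ls.foldl pvStepA (d, none, [])) = pvAssign d (pvSegs ls) := by
  induction ls generalizing d with
  | nil => simp [pvFinA, pvAssign, pvSegs]
  | cons l ls ih =>
      cases hm : pvMatch l with
      | some h =>
          simp only [List.foldl_cons, pvStepA, hm]
          rw [pv_runA_pending]
          rw [pvSegs]
          simp [hm]
      | none =>
          simp only [List.foldl_cons, pvStepA, hm]
          rw [ih, pvSegs]
          simp [hm]

theorem pv_alt_eq (record_text : String) :
    extract_fields_from_record_alt record_text =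
      (pvAssign pvInit (pvSegs ((PySem.Str.split? record_text "\n").getD []))).items := by
  simp only [extract_fields_from_record_alt]
  rw [pv_marks_foldl, List.nil_append]
  have := pv_pairs_segs ((PySem.Str.split? record_text "\n").getD []).length
    ((PySem.Str.split? record_text "\n").getD []) le_rfl []
  simp only [List.nil_append, List.length_nil, Nat.cast_zero] at this
  rw [← this, pvPairs, pvAssign, List.foldl_map]

-- ===== VERDICT (by name: the statement is the Claim_ definition above) =====
theorem extract_fields_from_record_spec : Claim_equal_extract_fields_from_record := by
  intro record_text _
  unfold Spec_extract_fields_from_record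
  rw [pv_alt_eq]
  simp only [extract_fields_from_record]
  rw [pv_runA]
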